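-- pv_equiv track=rewrite | github.com/Corentin312/WaterSortSolver | game.py | get_top
-- ===== SOURCE A (Python) =====
-- from typing import List, Tuple
--
-- def get_top(tube: Tuple[int, int, int, int]) -> Tuple[int, int, int]:
--     top, top_size, empty_size = 0, 0, 0
--     for v in tube:
--         if v == 0 and top == 0:
--             empty_size += 1
--         elif top == 0:
--             top, top_size = v, 1
--         elif v == top:
--             top_size += 1
--         else:
--             break
--     return top, top_size, empty_size
-- ===== SOURCE B (Python) =====
-- def get_top(tube):
--     # run-length encode the tube, then read leading-zero group and next group
--     groups = []
--     for v in tube: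
--         if groups and groups[-1][0] == v:
--             groups[-1][1] += 1
--         else:
--             groups.append([v, 1])
--     empty_size = 0
--     if groups and groups[0][0] == 0:
--         empty_size = groups[0][1]
--         groups = groups[1:]
--     if not groups:
--         return 0, 0, empty_size
--     return groups[0][0], groups[0][1], empty_size
-- ===== Notes on version B (the rewrite author's own statement) =====
-- stated objective: alternative
-- what changed: B replaces A's stateful scan (top/top_size/empty_size with a break) by first run-length encoding the tube into (value,count) groups, then reading the leading zero group as empty_size and the next group as top/top_size.
import Mathlib
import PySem

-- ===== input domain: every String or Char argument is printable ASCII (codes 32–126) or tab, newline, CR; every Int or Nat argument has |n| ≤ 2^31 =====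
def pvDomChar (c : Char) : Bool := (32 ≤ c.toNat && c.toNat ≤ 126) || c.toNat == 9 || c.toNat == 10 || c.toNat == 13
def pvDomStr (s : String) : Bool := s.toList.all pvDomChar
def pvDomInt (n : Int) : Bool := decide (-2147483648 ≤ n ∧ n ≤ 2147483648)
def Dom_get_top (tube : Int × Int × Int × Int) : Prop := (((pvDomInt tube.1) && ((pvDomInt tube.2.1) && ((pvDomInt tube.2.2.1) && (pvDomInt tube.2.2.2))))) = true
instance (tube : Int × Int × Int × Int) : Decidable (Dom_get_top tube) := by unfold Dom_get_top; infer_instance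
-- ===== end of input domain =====

-- B replaces A's stateful break-scan by a run-length encoding of the tube followed by
-- reading the leading zero group and the next group (objective: alternative decomposition).


-- ===== PORT A =====
-- A's loop with break, as structural recursion over the four values in order.
def getTopLoopA : (Int × Int × Int) → List Int → Int × Int × Int
  | (top, top_size, empty_size), [] => (top, top_size, empty_size)
  | (top, top_size, empty_size), v :: rest =>
    if v = 0 ∧ top = 0 then getTopLoopA (top, top_size, empty_size + 1) rest
    else if top = 0 then getTopLoopA (v, 1, empty_size) rest
    else if v = top then getTopLoopA (top, top_size + 1, empty_size) rest
    else (top, top_size, empty_size)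

def get_top (tube : Int × Int × Int × Int) : Int × Int × Int :=
  getTopLoopA (0, 0, 0) [tube.1, tube.2.1, tube.2.2.1, tube.2.2.2]

-- ===== PORT B =====
-- Source B's group builder: extend the last run or append a new (value, count) group.
def addToGroups (groups : List (Int × Int)) (v : Int) : List (Int × Int) :=
  match groups.getLast? with
  | some (k, c) => if k = v then groups.dropLast ++ [(k, c + 1)] else groups ++ [(v, 1)]
  | none => [(v, 1)]

def get_top_alt (tube : Int × Int × Int × Int) : Int × Int × Int :=
  let groups := [tube.1, tube.2.1, tube.2.2.1, tube.2.2.2].foldl addToGroups []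
  let p : Int × List (Int × Int) :=
    match groups with
    | (k, c) :: rest => if k = 0 then (c, rest) else (0, groups)
    | [] => (0, [])
  match p.2 with
  | [] => (0, 0, p.1)
  | (k, c) :: _ => (k, c, p.1)

-- ===== PRECONDITION & SPEC =====
def Spec_get_top (tube : Int × Int × Int × Int) (out : Int × Int × Int) : Prop := out = get_top_alt tube
instance (tube : Int × Int × Int × Int) (out : Int × Int × Int) : Decidable (Spec_get_top tube out) := by unfold Spec_get_top; infer_instance

-- ===== CLAIM (what is proved, stated in full; the proofs are below) =====
def Claim_equal_get_top : Prop := ∀ (tube : Int × Int × Int × Int), Dom_get_top tube → Spec_get_top tube (get_top tube)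

-- ===== LEMMAS AND PROOFS =====

-- ===== VERDICT (by name: the statement is the Claim_ definition above) =====
set_option maxHeartbeats 16000000 in
theorem get_top_spec : Claim_equal_get_top := by
  intro ⟨a, b, c, d⟩ _
  show get_top (a,b,c,d) = get_top_alt (a,b,c,d)
  unfold get_top get_top_alt
  by_cases ha : a = 0 <;> by_cases hb : b = 0 <;> by_cases hc : c = 0 <;> by_cases hd : d = 0 <;>
    by_cases hba : b = a <;> by_cases hcb : c = b <;> by_cases hdc : d = c <;> by_cases hdb : d = b <;>
    simp_all [getTopLoopA, addToGroups, eq_comm]
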